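-- pv_equiv track=rewrite | github.com/strumberr/tetralogue-logogram | logogram_generator.py | map_input_to_output
-- ===== SOURCE A (Python) =====
-- def map_input_to_output(input_range):
--     mapping = {
--         (1, 2): 'AB',
--         (3, 4): 'CD',
--         (5, 6): 'EF',
--         (7, 8): 'GH',
--         (9, 10): 'IJ',
--         (11, 12): 'KL',
--         (13, 14): 'MN',
--         (15, 16): 'OP',
--         (17, 18): 'QR',
--         (19, 20): 'ST',
--         (21, 22): 'UV',
--         (23, 24): 'WX',
--         (25, 26): 'YZ',
--     }
--
--     for key, value in mapping.items():
--         if key[0] <= input_range <= key[1]: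
--             return value
--
--     return None
-- ===== SOURCE B (Python) =====
-- LETTERS = 'ABCDEFGHIJKLMNOPQRSTUVWXYZ'
--
-- def map_input_to_output(input_range):
--     if 1 <= input_range <= 26:
--         k = (input_range + 1) // 2
--         return LETTERS[2*k - 2:2*k]
--     return None
-- ===== Notes on version B (the rewrite author's own statement) =====
-- stated objective: simpler
-- what changed: Replaces the 13-entry pair-range table scan with a closed-form index into the alphabet string: k = (n+1)//2 and a 2-character slice, guarded by 1 <= n <= 26.
import Mathlib
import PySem

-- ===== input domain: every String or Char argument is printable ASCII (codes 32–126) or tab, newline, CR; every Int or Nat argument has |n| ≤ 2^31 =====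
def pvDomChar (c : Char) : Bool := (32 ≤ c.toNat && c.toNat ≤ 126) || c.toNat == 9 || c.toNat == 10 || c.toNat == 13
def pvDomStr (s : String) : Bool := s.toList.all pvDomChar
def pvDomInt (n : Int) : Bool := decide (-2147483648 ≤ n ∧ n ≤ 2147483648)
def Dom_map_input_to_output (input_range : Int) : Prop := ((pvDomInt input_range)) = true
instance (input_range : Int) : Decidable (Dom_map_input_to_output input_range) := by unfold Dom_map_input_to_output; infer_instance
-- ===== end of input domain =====

-- B replaces A's 13-entry range-table scan with a closed-form alphabet-string slice (simpler).


-- ===== PORT A =====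
def map_input_to_output_loop (input_range : Int) : List ((Int × Int) × String) → Option String
  | [] => none
  | (key, value) :: rest =>
      if key.1 ≤ input_range ∧ input_range ≤ key.2 then some value
      else map_input_to_output_loop input_range rest

def map_input_to_output (input_range : Int) : Option String :=
  map_input_to_output_loop input_range
    [((1, 2), "AB"), ((3, 4), "CD"), ((5, 6), "EF"), ((7, 8), "GH"),
     ((9, 10), "IJ"), ((11, 12), "KL"), ((13, 14), "MN"), ((15, 16), "OP"),
     ((17, 18), "QR"), ((19, 20), "ST"), ((21, 22), "UV"), ((23, 24), "WX"),
     ((25, 26), "YZ")]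

-- ===== PORT B =====
def pvLetters : List Char := "ABCDEFGHIJKLMNOPQRSTUVWXYZ".toList

def map_input_to_output_alt (input_range : Int) : Option String :=
  if 1 ≤ input_range ∧ input_range ≤ 26 then
    let k := PySem.Int.floordiv (input_range + 1) 2
    some (String.ofList (PySem.List.slice pvLetters (some (2*k - 2)) (some (2*k))))
  else none

-- ===== PRECONDITION & SPEC =====
def Spec_map_input_to_output (input_range : Int) (out : Option String) : Prop := out = map_input_to_output_alt input_range
instance (input_range : Int) (out : Option String) : Decidable (Spec_map_input_to_output input_range out) := by unfold Spec_map_input_to_output; infer_instance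

-- ===== CLAIM (what is proved, stated in full; the proofs are below) =====
def Claim_equal_map_input_to_output : Prop := ∀ (input_range : Int), Dom_map_input_to_output input_range → Spec_map_input_to_output input_range (map_input_to_output input_range)

-- ===== LEMMAS AND PROOFS =====

-- ===== VERDICT (by name: the statement is the Claim_ definition above) =====
lemma pv_loop_none (n : Int) (L : List ((Int × Int) × String))
    (h : ∀ p ∈ L, ¬(p.1.1 ≤ n ∧ n ≤ p.1.2)) :
    map_input_to_output_loop n L = none := by
  induction L with
  | nil => rfl
  | cons a t ih =>
      rw [map_input_to_output_loop, if_neg (h a (by simp))]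
      exact ih (fun p hp => h p (List.mem_cons_of_mem _ hp))

-- ===== VERDICT (by name: the statement is the Claim_ definition above) =====
theorem map_input_to_output_spec : Claim_equal_map_input_to_output := by
  intro n _hd
  unfold Spec_map_input_to_output
  by_cases h : 1 ≤ n ∧ n ≤ 26
  · obtain ⟨h1, h2⟩ := h
    interval_cases n <;> rfl
  · have ha : map_input_to_output n = none := by
      apply pv_loop_none
      intro p hp
      fin_cases hp <;> simp <;> omega
    have hb : map_input_to_output_alt n = none := by
      simp only [map_input_to_output_alt]
      rw [if_neg h]
    rw [ha, hb]
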